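-- pv_equiv track=rewrite | github.com/nattfalk/advent-of-code | 2025/day06/main.py | part2
-- ===== SOURCE A (Python) =====
-- from functools import reduce
-- from operator import mul, add
--
-- def part2(data: list[str]) -> int:
--     operators = data[-1].split()
--
--     cols = [''.join(col).strip() for col in zip(*data[:-1])]
--
--     total = 0
--     op_idx = 0
--     values = []
--     for val in cols:
--         if (val == ""):
--             total += reduce(add if operators[op_idx] == "+" else mul, values)
--             values.clear()
--             op_idx += 1
--         else:
--             values.append(int(val))
--
--     if len(values) > 0:
--         total += reduce(add if operators[op_idx] == "+" else mul, values)
--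
--     return total
-- ===== SOURCE B (Python) =====
-- def part2(data: list[str]) -> int:
--     *rows, opline = data
--     operators = opline.split()
--     n = min(map(len, rows), default=0)
--     cols = [''.join(r[j] for r in rows).strip() for j in range(n)]
--
--     # locate-and-slice: repeatedly find the next blank separator column,
--     # evaluate the whole group at once, and drop it from the front.
--     total = 0
--     k = 0
--     while cols:
--         try:
--             cut = cols.index('')
--         except ValueError:
--             cut = len(cols)
--         nums = [int(t) for t in cols[:cut]]
--         if operators[k] == '+':
--             val = sum(nums)
--         else:
--             val = 1
--             for x in nums:
--                 val *= x
--         total += val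
--         cols = cols[cut + 1:]
--         k += 1
--     return total
-- ===== Notes on version B (the rewrite author's own statement) =====
-- stated objective: alternative
-- what changed: A runs a per-token state machine (append to a pending values list, flush a reduce() into the total at each blank token, conditional trailing flush); B instead repeatedly locates the next blank separator column with list.index, evaluates that whole group at once (sum builtin, or an explicit product loop instead of reduce) and slices it off the front, so it carries no pending-values/flush state at all.
import Mathlib
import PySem

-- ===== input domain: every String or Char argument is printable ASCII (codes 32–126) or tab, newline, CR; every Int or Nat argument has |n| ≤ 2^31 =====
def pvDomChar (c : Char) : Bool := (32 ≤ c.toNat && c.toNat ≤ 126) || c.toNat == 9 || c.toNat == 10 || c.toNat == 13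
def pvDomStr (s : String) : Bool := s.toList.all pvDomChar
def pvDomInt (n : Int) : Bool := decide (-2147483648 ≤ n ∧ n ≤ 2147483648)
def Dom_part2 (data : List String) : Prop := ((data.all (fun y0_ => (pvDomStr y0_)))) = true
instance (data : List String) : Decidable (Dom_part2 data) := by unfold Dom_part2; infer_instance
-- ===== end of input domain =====

-- B replaces A's per-token accumulate-and-flush state machine by a locate-separator-and-slice
-- loop that evaluates each group at once; objective: alternative structure, same cost.

-- ===== PORT A =====

-- cols = [''.join(col).strip() for col in zip(*data[:-1])]  (data[:-1] = List.dropLast)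
-- zip(*rows): truncates every row to the shortest length; zip() of no rows is []
def zipCols (rows : List (List Char)) : List (List Char) :=
  match rows with
  | [] => []
  | r :: rs =>
    let n := rs.foldl (fun m row => min m row.length) r.length
    (List.range n).map (fun j => (r :: rs).map (fun row => row.getD j ' '))

def colsOf (data : List String) : List (List Char) :=
  (zipCols ((data.dropLast).map String.toList)).map (fun col => PySem.Chars.strip col)

-- reduce(f, values): ValueError (none) on [], else left fold from the head
def reduce1 (f : Int → Int → Int) : List Int → Option Int
  | [] => none
  | v :: vs => some (vs.foldl f v)

-- A's single fused loop over cols (state: total, op_idx, values); none = Python raises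
def loopA (ops : List (List Char)) : List (List Char) → Int → Nat → List Int → Option Int
  | [], total, opIdx, values =>
    if values.length > 0 then
      match PySem.List.pyGet? ops (opIdx : Int) with
      | none => none
      | some o => (reduce1 (if o == ['+'] then (· + ·) else (· * ·)) values).map (total + ·)
    else some total
  | c :: rest, total, opIdx, values =>
    if c == [] then
      match PySem.List.pyGet? ops (opIdx : Int) with
      | none => none
      | some o =>
        match reduce1 (if o == ['+'] then (· + ·) else (· * ·)) values with
        | none => none
        | some v => loopA ops rest (total + v) (opIdx + 1) []
    else
      match PySem.Int.ofChars? c with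
      | none => none
      | some n => loopA ops rest total opIdx (values ++ [n])

def part2 (data : List String) : Int :=
  match PySem.List.pyGet? data (-1) with
  | none => 0      -- data[-1] raises IndexError on []; excluded by Pre_part2
  | some lastLine =>
    let ops := PySem.Chars.split₀ lastLine.toList
    match loopA ops (colsOf data) 0 0 [] with
    | some t => t
    | none => 0    -- Python raises here; excluded by Pre_part2

-- ===== PORT B =====

-- Source B: cols = [''.join(r[j] for r in rows).strip() for j in range(n)], n = min(map(len, rows), default=0)
def colsB (data : List String) : List (List Char) :=
  let rows := (data.dropLast).map String.toList
  let n := match rows.map List.length with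
           | [] => 0                        -- default=0
           | l :: ls => ls.foldl min l      -- min(...)
  (List.range n).map (fun j => PySem.Chars.strip (rows.map (fun r => r.getD j ' ')))

-- nums = [int(t) for t in cols[:cut]]; none = some int() raised ValueError
def parseAll : List (List Char) → Option (List Int)
  | [] => some []
  | c :: cs =>
    match PySem.Int.ofChars? c with
    | none => none
    | some n => (parseAll cs).map (n :: ·)

-- Source B's while loop (state: total, k); cols.index('') → cut, operators[k] may raise (none)
def evalLoop (ops : List (List Char)) : List (List Char) → Int → Nat → Option Int
  | [], total, _ => some total
  | c :: cs, total, k =>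
    let cut := (PySem.List.index? (c :: cs) ([] : List Char)).getD (c :: cs).length
    match parseAll ((c :: cs).take cut) with
    | none => none
    | some nums =>
      match PySem.List.pyGet? ops (k : Int) with
      | none => none
      | some op =>
        let val := if op == ['+'] then nums.sum else nums.foldl (· * ·) 1
        evalLoop ops ((c :: cs).drop (cut + 1)) (total + val) (k + 1)
  termination_by cols _ _ => cols.length
  decreasing_by simp

def part2_alt (data : List String) : Int :=
  match data.getLast? with
  | none => 0    -- '*rows, opline = data' raises ValueError on []
  | some opline =>
    let ops := PySem.Chars.split₀ opline.toList
    match evalLoop ops (colsB data) 0 0 with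
    | some t => t
    | none => 0

-- ===== PRECONDITION & SPEC =====

-- shape of the column tokens: every group flushed on an empty token must be nonempty
-- (curNonempty says whether the group being collected already holds a value)
def groupsOK (curNonempty : Bool) : List (List Char) → Bool
  | [] => true
  | c :: rest => if c == [] then curNonempty && groupsOK false rest else groupsOK true rest

-- how many groups the token list describes (= number of flushes A performs)
def groupCount (curNonempty : Bool) : List (List Char) → Nat
  | [] => if curNonempty then 1 else 0
  | c :: rest => if c == [] then 1 + groupCount false rest else groupCount true rest

-- Pre_part2 = exactly the inputs on which the Python A returns: data nonempty (data[-1]),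
-- every nonempty column token parses as an int, no group is empty (reduce([]) is a TypeError),
-- and there is an operator for every group (operators[op_idx] IndexError otherwise).
def Pre_part2 (data : List String) : Prop :=
  data ≠ [] ∧
  (∀ c ∈ colsOf data, c ≠ [] → (PySem.Int.ofChars? c).isSome) ∧
  groupsOK false (colsOf data) = true ∧
  groupCount false (colsOf data) ≤ (PySem.Chars.split₀ ((data.getLast?.getD "").toList)).length

instance (data : List String) : Decidable (Pre_part2 data) := by unfold Pre_part2; infer_instance

def pvWitness_part2 : List String := ["1 23", "4 56", "+ *"]

def Spec_part2 (data : List String) (out : Int) : Prop := out = part2_alt data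
instance (data : List String) (out : Int) : Decidable (Spec_part2 data out) := by unfold Spec_part2; infer_instance

-- ===== CLAIM (what is proved, stated in full; the proofs are below) =====
def Claim_equal_part2 : Prop := ∀ (data : List String), Dom_part2 data → Pre_part2 data → Spec_part2 data (part2 data)

-- ===== LEMMAS AND PROOFS =====

-- unfolding equations for the wf-recursive evalLoop
lemma evalLoop_nil (ops : List (List Char)) (total : Int) (k : Nat) :
    evalLoop ops [] total k = some total := by
  rw [evalLoop.eq_def]

lemma evalLoop_ne_nil (ops : List (List Char)) (cols : List (List Char)) (total : Int) (k : Nat)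
    (h : cols ≠ []) :
    evalLoop ops cols total k =
      (let cut := (PySem.List.index? cols ([] : List Char)).getD cols.length
       match parseAll (cols.take cut) with
       | none => none
       | some nums =>
         match PySem.List.pyGet? ops (k : Int) with
         | none => none
         | some op =>
           let val := if op == ['+'] then nums.sum else nums.foldl (· * ·) 1
           evalLoop ops (cols.drop (cut + 1)) (total + val) (k + 1)) := by
  cases cols with
  | nil => exact absurd rfl h
  | cons c cs => rw [evalLoop.eq_def]

-- B builds the same column tokens as A
lemma colsB_eq_colsOf (data : List String) : colsB data = colsOf data := by
  unfold colsB colsOf zipCols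
  cases h : (data.dropLast).map String.toList with
  | nil => simp
  | cons r rs =>
    simp only [List.map_cons, List.map_map]
    rw [List.foldl_map]
    rfl

lemma ofChars?_nil : PySem.Int.ofChars? ([] : List Char) = none := by decide

-- stepping A's loop over a run of parsed (hence nonempty) tokens appends them to values
lemma loopA_parsed_prefix (ops : List (List Char)) :
    ∀ (pre : List (List Char)) (ns : List Int), parseAll pre = some ns →
    ∀ (rest : List (List Char)) (total : Int) (i : Nat) (values : List Int),
      loopA ops (pre ++ rest) total i values = loopA ops rest total i (values ++ ns) := by
  intro pre
  induction pre with
  | nil => intro ns h rest total i values; simp [parseAll] at h; subst h; simp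
  | cons c cs ih =>
    intro ns h rest total i values
    simp only [parseAll] at h
    cases hc : PySem.Int.ofChars? c with
    | none => rw [hc] at h; exact absurd h (by simp)
    | some n =>
      rw [hc] at h
      cases hcs : parseAll cs with
      | none => rw [hcs] at h; exact absurd h (by simp)
      | some ms =>
        rw [hcs] at h
        simp only [Option.map_some, Option.some.injEq] at h
        have hcne : (c == ([] : List Char)) = false := by
          cases hb : (c == ([] : List Char))
          · rfl
          · have : c = [] := by simpa using hb
            rw [this, ofChars?_nil] at hc; exact absurd hc (by simp)
        simp only [List.cons_append, loopA, hcne, Bool.false_eq_true, if_false, hc]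
        rw [ih ms hcs rest total i (values ++ [n])]
        rw [← h, List.append_assoc]
        rfl

lemma parseAll_of_tokens (pre : List (List Char))
    (h : ∀ c ∈ pre, c ≠ [] → (PySem.Int.ofChars? c).isSome)
    (hne : ∀ c ∈ pre, c ≠ []) :
    ∃ ns, parseAll pre = some ns ∧ ns.length = pre.length := by
  induction pre with
  | nil => exact ⟨[], rfl, rfl⟩
  | cons c cs ih =>
    obtain ⟨n, hn⟩ := Option.isSome_iff_exists.mp
      (h c List.mem_cons_self (hne c List.mem_cons_self))
    obtain ⟨ms, hms, hlen⟩ := ih (fun x hx => h x (List.mem_cons_of_mem _ hx))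
      (fun x hx => hne x (List.mem_cons_of_mem _ hx))
    exact ⟨n :: ms, by simp [parseAll, hn, hms], by simp [hlen]⟩

-- reduce(add, v::vs) is sum, reduce(mul, v::vs) is the product loop from 1
lemma foldl_add_eq_sum (v : Int) (vs : List Int) : vs.foldl (· + ·) v = (v :: vs).sum := by
  induction vs generalizing v with
  | nil => simp
  | cons a vs ih => simp only [List.foldl_cons, ih]; simp; ring

lemma foldl_mul_eq_prodloop (v : Int) (vs : List Int) :
    vs.foldl (· * ·) v = (v :: vs).foldl (· * ·) 1 := by
  simp [List.foldl_cons]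

-- groupsOK / groupCount across a run of nonempty tokens
lemma groupsOK_prefix (pre : List (List Char)) (hne : ∀ c ∈ pre, c ≠ []) :
    ∀ (b : Bool) (rest : List (List Char)),
      groupsOK b (pre ++ rest) = groupsOK (b || !pre.isEmpty) rest := by
  induction pre with
  | nil => intro b rest; simp
  | cons c cs ih =>
    intro b rest
    have hc : (c == ([] : List Char)) = false := by
      cases hb : (c == ([] : List Char))
      · rfl
      · exact absurd (by simpa using hb) (hne c List.mem_cons_self)
    simp only [List.cons_append, groupsOK, hc, Bool.false_eq_true, if_false]
    rw [ih (fun x hx => hne x (List.mem_cons_of_mem _ hx)) true rest]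
    simp

lemma groupCount_prefix (pre : List (List Char)) (hne : ∀ c ∈ pre, c ≠ []) :
    ∀ (b : Bool) (rest : List (List Char)),
      groupCount b (pre ++ rest) = groupCount (b || !pre.isEmpty) rest := by
  induction pre with
  | nil => intro b rest; simp
  | cons c cs ih =>
    intro b rest
    have hc : (c == ([] : List Char)) = false := by
      cases hb : (c == ([] : List Char))
      · rfl
      · exact absurd (by simpa using hb) (hne c List.mem_cons_self)
    simp only [List.cons_append, groupCount, hc, Bool.false_eq_true, if_false]
    rw [ih (fun x hx => hne x (List.mem_cons_of_mem _ hx)) true rest]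
    simp

-- the main bridge: A's fused loop equals B's locate-and-slice loop under Pre's shape conditions
lemma loopA_eq_evalLoop (ops : List (List Char)) (cols : List (List Char)) (total : Int) (i : Nat)
    (htok : ∀ c ∈ cols, c ≠ [] → (PySem.Int.ofChars? c).isSome)
    (hok : groupsOK false cols = true)
    (hcnt : groupCount false cols + i ≤ ops.length) :
    loopA ops cols total i [] = evalLoop ops cols total i := by
  cases hcols : cols with
  | nil => simp [loopA, evalLoop_nil]
  | cons c0 cs0 =>
  rw [← hcols]
  cases hidx : PySem.List.index? cols ([] : List Char) with
  | some cut =>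
    -- cols = pre ++ [] :: post
    obtain ⟨pre, post, hdec, hlen, hnm⟩ := (PySem.List.index?_eq_some_iff _ _ _).mp hidx
    subst hdec
    have hprene : ∀ c ∈ pre, c ≠ [] := fun c hc h => hnm (h ▸ hc)
    have htake : (pre ++ [] :: post).take cut = pre := by
      rw [← hlen, List.take_left]
    have hdrop : (pre ++ [] :: post).drop (cut + 1) = post := by
      rw [← hlen]
      rw [show pre.length + 1 = (pre ++ [[]]).length by simp]
      rw [show pre ++ [] :: post = (pre ++ [[]]) ++ post by simp]
      exact List.drop_left
    have htokpre : ∀ c ∈ pre, c ≠ [] → (PySem.Int.ofChars? c).isSome := by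
      intro c hc; exact htok c (List.mem_append_left _ hc)
    obtain ⟨ns, hns, hnslen⟩ := parseAll_of_tokens pre htokpre hprene
    -- pre must be nonempty (groupsOK forbids an empty group)
    have hok' := hok
    rw [groupsOK_prefix pre hprene] at hok'
    have hpreemp : pre.isEmpty = false := by
      cases pre with
      | nil => simp [groupsOK] at hok'
      | cons p ps => rfl
    rw [hpreemp] at hok'
    simp only [Bool.false_or, Bool.not_false, groupsOK, BEq.rfl, if_true, Bool.true_and] at hok'
    have hcnt' := hcnt
    rw [groupCount_prefix pre hprene, hpreemp] at hcnt'
    simp only [groupCount, BEq.rfl, if_true] at hcnt'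
    have hi : i < ops.length := by omega
    have hget : PySem.List.pyGet? ops (i : Int) = some ops[i] := by
      rw [PySem.List.pyGet?_natCast]; simp [hi]
    -- ns nonempty
    have hnsne : ns ≠ [] := by
      intro h
      rw [h] at hnslen
      cases pre with
      | nil => simp at hpreemp
      | cons p ps => simp at hnslen
    obtain ⟨v, vs, hvs⟩ := List.exists_cons_of_ne_nil hnsne
    -- A side
    rw [loopA_parsed_prefix ops pre ns hns]
    simp only [List.nil_append, loopA, BEq.rfl, if_true, hget, hvs, reduce1]
    -- B side
    rw [evalLoop_ne_nil ops (pre ++ [] :: post) total i (by simp)]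
    simp only [hidx, Option.getD_some, htake, hns, hget, hdrop]
    have hval : vs.foldl (if ops[i] == ['+'] then (· + ·) else (· * ·)) v
        = (if ops[i] == ['+'] then ns.sum else ns.foldl (· * ·) 1) := by
      by_cases hop : (ops[i] == ['+']) = true
      · simp only [hop, if_true, hvs]; exact foldl_add_eq_sum v vs
      · simp only [hop, hvs]
        exact foldl_mul_eq_prodloop v vs
    rw [hval]
    -- recurse on post
    have htokpost : ∀ c ∈ post, c ≠ [] → (PySem.Int.ofChars? c).isSome := by
      intro c hc
      exact htok c (List.mem_append_right _ (List.mem_cons_of_mem _ hc))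
    exact loopA_eq_evalLoop ops post _ (i + 1) htokpost hok' (by omega)
  | none =>
    -- no separator: one trailing group (or nothing)
    have hnm : ([] : List Char) ∉ cols := (PySem.List.index?_eq_none_iff _ _).mp hidx
    have hne : ∀ c ∈ cols, c ≠ [] := fun c hc h => hnm (h ▸ hc)
    obtain ⟨ns, hns, hnslen⟩ := parseAll_of_tokens cols htok hne
    have hcnt' := hcnt
    rw [show cols = cols ++ [] by simp, groupCount_prefix cols hne] at hcnt'
    rw [hcols] at hcnt'
    simp only [List.isEmpty_cons, Bool.false_or, Bool.not_false, groupCount, if_true] at hcnt'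
    have hi : i < ops.length := by omega
    have hget : PySem.List.pyGet? ops (i : Int) = some ops[i] := by
      rw [PySem.List.pyGet?_natCast]; simp [hi]
    have hnsne : ns ≠ [] := by
      intro h; rw [h] at hnslen; rw [hcols] at hnslen; simp at hnslen
    obtain ⟨v, vs, hvs⟩ := List.exists_cons_of_ne_nil hnsne
    -- A side: consume all tokens, then the trailing flush
    conv_lhs => rw [show (cols : List (List Char)) = cols ++ [] from (List.append_nil cols).symm]
    rw [loopA_parsed_prefix ops cols ns hns]
    simp only [loopA, List.nil_append, hvs, List.length_cons, hget, reduce1,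
      gt_iff_lt, Nat.succ_pos, if_true, Option.map_some]
    -- B side
    rw [evalLoop_ne_nil ops cols total i (by rw [hcols]; simp)]
    simp only [hidx, Option.getD_none, List.take_length, hns, hget,
      List.drop_eq_nil_of_le (by omega : cols.length ≤ cols.length + 1)]
    rw [evalLoop_nil]
    have hval : vs.foldl (if ops[i] == ['+'] then (· + ·) else (· * ·)) v
        = (if ops[i] == ['+'] then ns.sum else ns.foldl (· * ·) 1) := by
      by_cases hop : (ops[i] == ['+']) = true
      · simp only [hop, if_true, hvs]; exact foldl_add_eq_sum v vs
      · simp only [hop, hvs]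
        exact foldl_mul_eq_prodloop v vs
    rw [hval]
termination_by cols.length
decreasing_by rw [hdec]; simp only [List.length_append, List.length_cons]; omega

-- ===== VERDICT (by name: the statement is the Claim_ definition above) =====
theorem part2_spec : Claim_equal_part2 := by
  intro data _ hPre
  obtain ⟨hne, htok, hok, hcnt⟩ := hPre
  unfold Spec_part2 part2 part2_alt
  rw [PySem.List.pyGet?_neg_one]
  cases hL : data.getLast? with
  | none => rfl
  | some lastLine =>
    rw [hL] at hcnt
    simp only [Option.getD_some] at hcnt
    dsimp only
    rw [colsB_eq_colsOf,
        loopA_eq_evalLoop _ _ 0 0 htok hok (by simpa using hcnt)]
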